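-- pv_equiv track=rewrite | github.com/ankits1626/cerra_ai | app/receipt_approver/utils.py | find_brand_by_code
-- ===== SOURCE A (Python) =====
-- def find_brand_by_code(code):
--     brand_lookup = {
--         "Alain Mikli": ["AO"],
--         "Armani Exchange": ["AX"],
--         "Burberry": ["BE", "JB"],
--         "Chanel": ["CH"],
--         "Coach": ["HC"],
--         "Dolce & Gabbana": ["DG"],
--         "Emporio Armani": ["EA", "EK"],
--         "Giorgio Armani": ["AR", "GA"],
--         "Michael Kors": ["MK"],
--         "Miu Miu": ["MU"],
--         "Oakley": ["OO", "SOK", "FOK", "OX", "OY", "OJF", "OK", "SOK", "OJ"],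
--         "Oliver Peoples": ["OV"],
--         "Persol": ["PO"],
--         "Prada": ["PR", "PS"],
--         "Ray-Ban": ["RB", "RX", "RY", "RJ", "RW", "RJ"],
--         "Starck Eyes": ["SH"],
--         "Tiffany & Co.": ["TF"],
--         "Versace": ["VE", "VK"],
--         "Vogue": ["VO"],
--         "Bvlgari": ["BV"],
--         "Polo Ralph Lauren": ["PH"],
--         "Swarovski": ["SK"],
--         "Miraflex": ["MF"],
--         "Jimmy Choo": ["JC"],
--     }
--
--     for brand, codes in brand_lookup.items():
--         if code in codes:
--             return brand
--     return None
-- ===== SOURCE B (Python) =====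
-- def find_brand_by_code(code):
--     code_to_brand = {
--         "AO": "Alain Mikli",
--         "AX": "Armani Exchange",
--         "BE": "Burberry",
--         "JB": "Burberry",
--         "CH": "Chanel",
--         "HC": "Coach",
--         "DG": "Dolce & Gabbana",
--         "EA": "Emporio Armani",
--         "EK": "Emporio Armani",
--         "AR": "Giorgio Armani",
--         "GA": "Giorgio Armani",
--         "MK": "Michael Kors",
--         "MU": "Miu Miu",
--         "OO": "Oakley",
--         "SOK": "Oakley",
--         "FOK": "Oakley",
--         "OX": "Oakley",
--         "OY": "Oakley",
--         "OJF": "Oakley",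
--         "OK": "Oakley",
--         "OJ": "Oakley",
--         "OV": "Oliver Peoples",
--         "PO": "Persol",
--         "PR": "Prada",
--         "PS": "Prada",
--         "RB": "Ray-Ban",
--         "RX": "Ray-Ban",
--         "RY": "Ray-Ban",
--         "RJ": "Ray-Ban",
--         "RW": "Ray-Ban",
--         "SH": "Starck Eyes",
--         "TF": "Tiffany & Co.",
--         "VE": "Versace",
--         "VK": "Versace",
--         "VO": "Vogue",
--         "BV": "Bvlgari",
--         "PH": "Polo Ralph Lauren",
--         "SK": "Swarovski",
--         "MF": "Miraflex",
--         "JC": "Jimmy Choo",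
--     }
--     return code_to_brand.get(code)
-- ===== Notes on version B (the rewrite author's own statement) =====
-- stated objective: idiomatic
-- what changed: Replaced the per-call scan over brand -> code-list entries with a flat inverted code -> brand table queried by a single dict.get, which returns None for unknown codes.
import Mathlib
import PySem

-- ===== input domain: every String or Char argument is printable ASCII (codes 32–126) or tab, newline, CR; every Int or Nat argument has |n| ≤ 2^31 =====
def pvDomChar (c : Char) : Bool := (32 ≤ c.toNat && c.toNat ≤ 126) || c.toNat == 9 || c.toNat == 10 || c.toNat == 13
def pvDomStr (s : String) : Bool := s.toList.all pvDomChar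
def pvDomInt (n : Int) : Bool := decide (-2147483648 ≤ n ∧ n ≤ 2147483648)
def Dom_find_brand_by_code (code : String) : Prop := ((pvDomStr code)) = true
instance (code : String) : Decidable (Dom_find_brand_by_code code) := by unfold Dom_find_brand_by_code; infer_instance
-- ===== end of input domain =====

-- B replaces A's per-call scan over brand → codes lists with a single get on a flat
-- code → brand table (more idiomatic; same observable behaviour, None for unknown codes).

-- ===== PORT A =====
-- A's brand_lookup dict literal (insertion order preserved)
def brandLookupA : PySem.Dict String (List String) := PySem.Dict.mk [
  ("Alain Mikli", ["AO"]),
  ("Armani Exchange", ["AX"]),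
  ("Burberry", ["BE", "JB"]),
  ("Chanel", ["CH"]),
  ("Coach", ["HC"]),
  ("Dolce & Gabbana", ["DG"]),
  ("Emporio Armani", ["EA", "EK"]),
  ("Giorgio Armani", ["AR", "GA"]),
  ("Michael Kors", ["MK"]),
  ("Miu Miu", ["MU"]),
  ("Oakley", ["OO", "SOK", "FOK", "OX", "OY", "OJF", "OK", "SOK", "OJ"]),
  ("Oliver Peoples", ["OV"]),
  ("Persol", ["PO"]),
  ("Prada", ["PR", "PS"]),
  ("Ray-Ban", ["RB", "RX", "RY", "RJ", "RW", "RJ"]),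
  ("Starck Eyes", ["SH"]),
  ("Tiffany & Co.", ["TF"]),
  ("Versace", ["VE", "VK"]),
  ("Vogue", ["VO"]),
  ("Bvlgari", ["BV"]),
  ("Polo Ralph Lauren", ["PH"]),
  ("Swarovski", ["SK"]),
  ("Miraflex", ["MF"]),
  ("Jimmy Choo", ["JC"])]

-- the 'for brand, codes in brand_lookup.items(): if code in codes: return brand' loop
def findBrandLoop (code : String) : List (String × List String) → Option String
  | [] => none
  | (brand, codes) :: rest =>
      if codes.contains code then some brand else findBrandLoop code rest

def find_brand_by_code (code : String) : Option String :=
  findBrandLoop code brandLookupA.items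

-- ===== PORT B =====
-- B's flat code → brand dict literal
def codeToBrandB : PySem.Dict String String := PySem.Dict.mk [
  ("AO", "Alain Mikli"),
  ("AX", "Armani Exchange"),
  ("BE", "Burberry"),
  ("JB", "Burberry"),
  ("CH", "Chanel"),
  ("HC", "Coach"),
  ("DG", "Dolce & Gabbana"),
  ("EA", "Emporio Armani"),
  ("EK", "Emporio Armani"),
  ("AR", "Giorgio Armani"),
  ("GA", "Giorgio Armani"),
  ("MK", "Michael Kors"),
  ("MU", "Miu Miu"),
  ("OO", "Oakley"),
  ("SOK", "Oakley"),
  ("FOK", "Oakley"),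
  ("OX", "Oakley"),
  ("OY", "Oakley"),
  ("OJF", "Oakley"),
  ("OK", "Oakley"),
  ("OJ", "Oakley"),
  ("OV", "Oliver Peoples"),
  ("PO", "Persol"),
  ("PR", "Prada"),
  ("PS", "Prada"),
  ("RB", "Ray-Ban"),
  ("RX", "Ray-Ban"),
  ("RY", "Ray-Ban"),
  ("RJ", "Ray-Ban"),
  ("RW", "Ray-Ban"),
  ("SH", "Starck Eyes"),
  ("TF", "Tiffany & Co."),
  ("VE", "Versace"),
  ("VK", "Versace"),
  ("VO", "Vogue"),
  ("BV", "Bvlgari"),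
  ("PH", "Polo Ralph Lauren"),
  ("SK", "Swarovski"),
  ("MF", "Miraflex"),
  ("JC", "Jimmy Choo")]

def find_brand_by_code_alt (code : String) : Option String :=
  codeToBrandB.get? code

-- ===== PRECONDITION & SPEC =====
def Spec_find_brand_by_code (code : String) (out : Option String) : Prop := out = find_brand_by_code_alt code
instance (code : String) (out : Option String) : Decidable (Spec_find_brand_by_code code out) := by unfold Spec_find_brand_by_code; infer_instance

-- ===== CLAIM (what is proved, stated in full; the proofs are below) =====
def Claim_equal_find_brand_by_code : Prop := ∀ (code : String), Dom_find_brand_by_code code → Spec_find_brand_by_code code (find_brand_by_code code)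

-- ===== LEMMAS AND PROOFS =====

-- every product code occurring anywhere in A's table
def allCodesA : List String := brandLookupA.items.flatMap (fun p => p.2)

theorem findBrandLoop_none (code : String) (l : List (String × List String))
    (h : ∀ p ∈ l, code ∉ p.2) : findBrandLoop code l = none := by
  induction l with
  | nil => rfl
  | cons hd tl ih =>
      obtain ⟨b, cs⟩ := hd
      have hc : cs.contains code = false := by
        simpa [List.contains_iff_mem] using h (b, cs) (List.mem_cons_self ..)
      simp only [findBrandLoop, hc, Bool.false_eq_true, if_false]
      exact ih (fun p hp => h p (List.mem_cons_of_mem _ hp))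

theorem keysB_subset_allCodesA : ∀ x ∈ codeToBrandB.keys, x ∈ allCodesA := by decide

-- ===== VERDICT (by name: the statement is the Claim_ definition above) =====
theorem find_brand_by_code_spec : Claim_equal_find_brand_by_code := by
  intro code _
  unfold Spec_find_brand_by_code
  by_cases h : code ∈ allCodesA
  · fin_cases h <;> rfl
  · have hA : find_brand_by_code code = none := by
      apply findBrandLoop_none
      intro p hp hc
      exact h (List.mem_flatMap.mpr ⟨p, hp, hc⟩)
    have hB : find_brand_by_code_alt code = none := by
      unfold find_brand_by_code_alt
      rw [PySem.Dict.get?_eq_none_iff_not_mem_keys]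
      exact fun hk => h (keysB_subset_allCodesA code hk)
    rw [hA, hB]
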